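-- pv_equiv track=rewrite | github.com/TimothyJMcKirgan/Music-Painter | MusicPainter.py | getMaxFreq
-- ===== SOURCE A (Python) =====
-- def getMaxFreq(spec, freq):
--     if len(spec) == 0 or len(freq) == 0:
--         return 0
--
--     maxfreq = freq[0]
--     maxspec = spec[0]
--     for j in range(len(spec)):
--         if spec[j] > maxspec:
--             maxspec = spec[j]
--             maxfreq = freq[j]
--
--     return maxfreq
-- ===== SOURCE B (Python) =====
-- def getMaxFreq(spec, freq):
--     if not spec or not freq:
--         return 0
--     pairs = list(zip(spec, freq))
--
--     def best(lo, hi):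
--         # argmax over pairs[lo:hi] by spectrum value, leftmost wins ties
--         if hi - lo == 1:
--             return pairs[lo]
--         mid = (lo + hi) // 2
--         left = best(lo, mid)
--         right = best(mid, hi)
--         return right if right[0] > left[0] else left
--
--     return best(0, len(pairs))[1]
-- ===== Notes on version B (the rewrite author's own statement) =====
-- stated objective: alternative
-- what changed: Replaces A's fused left-to-right running-max tracking loop with a divide-and-conquer argmax over the zipped (spec, freq) pairs: recursively find the best pair of each half and combine, preferring the left half on ties (which preserves A's first-occurrence rule).
import Mathlib
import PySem

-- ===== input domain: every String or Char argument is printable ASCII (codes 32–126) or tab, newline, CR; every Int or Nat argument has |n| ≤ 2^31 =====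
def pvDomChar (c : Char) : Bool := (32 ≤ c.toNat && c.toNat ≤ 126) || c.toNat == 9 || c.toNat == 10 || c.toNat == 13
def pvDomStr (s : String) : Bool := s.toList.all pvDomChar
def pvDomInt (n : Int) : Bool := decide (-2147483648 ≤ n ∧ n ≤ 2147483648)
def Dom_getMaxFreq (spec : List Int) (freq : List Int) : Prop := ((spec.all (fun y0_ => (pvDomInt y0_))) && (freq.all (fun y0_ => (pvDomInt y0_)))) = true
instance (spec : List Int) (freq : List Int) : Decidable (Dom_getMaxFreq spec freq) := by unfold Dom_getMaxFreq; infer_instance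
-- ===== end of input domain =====

-- B replaces A's fused running-max loop with a divide-and-conquer argmax over zipped (spec,freq) pairs (left half wins ties); objective: alternative.


-- ===== PORT A =====
-- freq.getD j 0 ports freq[j]; the access j ≥ freq.length (IndexError in Python) only happens outside Pre_getMaxFreq.
-- the loop body: if spec[j] > maxspec: maxspec, maxfreq = spec[j], freq[j]
def pvStep (spec freq : List Int) (st : Int × Int) (j : Nat) : Int × Int :=
  if spec.getD j 0 > st.1 then (spec.getD j 0, freq.getD j 0) else st

def getMaxFreq (spec : List Int) (freq : List Int) : Int :=
  if spec.length = 0 ∨ freq.length = 0 then 0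
  else
    ((List.range spec.length).foldl (pvStep spec freq) (spec.getD 0 0, freq.getD 0 0)).2

-- ===== PORT B =====
-- best(lo, hi): divide-and-conquer argmax over pairs[lo:hi], left half wins ties.
-- The fuel argument (and the ≤ in the base case) is a totality guard only: Python's best is
-- always called with lo < hi and the interval shrinks, so fuel = pairs.length never runs out.
def pvBest (pairs : List (Int × Int)) : Nat → Nat → Nat → Int × Int
  | 0, lo, _hi => pairs.getD lo (0, 0)
  | fuel + 1, lo, hi =>
    if hi ≤ lo + 1 then pairs.getD lo (0, 0)
    else
      let mid := (lo + hi) / 2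
      let left := pvBest pairs fuel lo mid
      let right := pvBest pairs fuel mid hi
      if right.1 > left.1 then right else left

def getMaxFreq_alt (spec : List Int) (freq : List Int) : Int :=
  if spec = [] ∨ freq = [] then 0
  else
    let pairs := spec.zip freq
    (pvBest pairs pairs.length 0 pairs.length).2

-- ===== PRECONDITION & SPEC =====
-- Pre_ excludes exactly the inputs on which A raises IndexError (the first position of spec's
-- maximum lies at or beyond the end of freq).
def Pre_getMaxFreq (spec : List Int) (freq : List Int) : Prop :=
  spec = [] ∨ freq = [] ∨
    spec.idxOf ((PySem.List.max? spec (fun y => y)).getD 0) < freq.length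
instance (spec : List Int) (freq : List Int) : Decidable (Pre_getMaxFreq spec freq) := by
  unfold Pre_getMaxFreq; infer_instance

def pvWitness_getMaxFreq : List Int × List Int := ([3, 7, 5], [10, 20, 30])

def Spec_getMaxFreq (spec : List Int) (freq : List Int) (out : Int) : Prop := out = getMaxFreq_alt spec freq
instance (spec : List Int) (freq : List Int) (out : Int) : Decidable (Spec_getMaxFreq spec freq out) := by unfold Spec_getMaxFreq; infer_instance

-- ===== CLAIM (what is proved, stated in full; the proofs are below) =====
def Claim_equal_getMaxFreq : Prop := ∀ (spec : List Int) (freq : List Int), Dom_getMaxFreq spec freq → Pre_getMaxFreq spec freq → Spec_getMaxFreq spec freq (getMaxFreq spec freq)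

-- ===== LEMMAS AND PROOFS =====

-- the combine step of B's divide and conquer (right wins only if strictly greater)
def pvCombine (l r : Int × Int) : Int × Int := if r.1 > l.1 then r else l

-- a linear left-fold argmax; purely a proof-side intermediate between the two ports
def pvLin : List (Int × Int) → Int × Int
  | [] => (0, 0)
  | h :: t => t.foldl pvCombine h

theorem pvCombine_assoc (a b c : Int × Int) :
    pvCombine (pvCombine a b) c = pvCombine a (pvCombine b c) := by
  unfold pvCombine; split_ifs <;> first | rfl | omega

theorem pv_foldl_combine (l : List (Int × Int)) :
    ∀ a b, l.foldl pvCombine (pvCombine a b) = pvCombine a (l.foldl pvCombine b) := by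
  induction l with
  | nil => intro a b; rfl
  | cons c t ih =>
    intro a b
    simp only [List.foldl_cons]
    rw [pvCombine_assoc, ih]

theorem pvLin_append (xs ys : List (Int × Int)) (hx : xs ≠ []) (hy : ys ≠ []) :
    pvLin (xs ++ ys) = pvCombine (pvLin xs) (pvLin ys) := by
  rcases xs with _ | ⟨h, t⟩
  · exact absurd rfl hx
  rcases ys with _ | ⟨h2, t2⟩
  · exact absurd rfl hy
  show (t ++ h2 :: t2).foldl pvCombine h = _
  rw [List.foldl_append]
  simp only [List.foldl_cons]
  rw [pv_foldl_combine]
  rfl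

theorem pvBest_eq_pvLin (pairs : List (Int × Int)) :
    ∀ fuel lo hi, hi - lo ≤ fuel → lo < hi → hi ≤ pairs.length →
      pvBest pairs fuel lo hi = pvLin ((pairs.drop lo).take (hi - lo)) := by
  intro fuel
  induction fuel with
  | zero => intro lo hi hd hlt _; omega
  | succ fuel ih =>
    intro lo hi hd hlt hle
    by_cases hb : hi ≤ lo + 1
    · have hhi : hi = lo + 1 := by omega
      have hlo : lo < pairs.length := by omega
      have hdrop : pairs.drop lo = pairs[lo] :: pairs.drop (lo + 1) :=
        List.drop_eq_getElem_cons hlo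
      have htake : (pairs.drop lo).take (hi - lo) = [pairs[lo]] := by
        have h1 : hi - lo = 1 := by omega
        rw [h1, hdrop]
        rfl
      simp only [pvBest]
      rw [if_pos hb, htake]
      simp [pvLin, List.getElem?_eq_getElem hlo]
    · simp only [pvBest]
      rw [if_neg hb]
      show (if (pvBest pairs fuel ((lo + hi) / 2) hi).1 > (pvBest pairs fuel lo ((lo + hi) / 2)).1
              then pvBest pairs fuel ((lo + hi) / 2) hi
              else pvBest pairs fuel lo ((lo + hi) / 2))
           = pvLin ((pairs.drop lo).take (hi - lo))
      have hlm : lo < (lo + hi) / 2 := by omega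
      have hmh : (lo + hi) / 2 < hi := by omega
      rw [ih lo ((lo + hi) / 2) (by omega) hlm (by omega),
          ih ((lo + hi) / 2) hi (by omega) hmh hle]
      have hsplit : (pairs.drop lo).take (hi - lo)
          = (pairs.drop lo).take ((lo + hi) / 2 - lo) ++ (pairs.drop ((lo + hi) / 2)).take (hi - (lo + hi) / 2) := by
        have hsum : hi - lo = ((lo + hi) / 2 - lo) + (hi - (lo + hi) / 2) := by omega
        have hdd : (pairs.drop lo).drop ((lo + hi) / 2 - lo) = pairs.drop ((lo + hi) / 2) := by
          rw [List.drop_drop]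
          congr 1
          omega
        rw [hsum, List.take_add, hdd]
      rw [hsplit, pvLin_append]
      · rfl
      · apply List.ne_nil_of_length_pos
        rw [List.length_take, List.length_drop]
        omega
      · apply List.ne_nil_of_length_pos
        rw [List.length_take, List.length_drop]
        omega

theorem pv_mem_le_foldl_max (t : List Int) (x : Int) :
    x ≤ t.foldl max x ∧ ∀ y ∈ t, y ≤ t.foldl max x := by
  induction t generalizing x with
  | nil => simp
  | cons a t ih =>
    refine ⟨le_trans (le_max_left x a) (ih (max x a)).1, ?_⟩
    intro y hy
    rcases List.mem_cons.mp hy with rfl | h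
    · exact le_trans (le_max_right x y) (ih (max x y)).1
    · exact (ih (max x a)).2 y h

theorem pv_foldl_max_mem (t : List Int) (x : Int) : t.foldl max x ∈ x :: t := by
  induction t generalizing x with
  | nil => simp
  | cons a t ih =>
    rcases List.mem_cons.mp (ih (max x a)) with h | h
    · rcases max_choice x a with hc | hc <;> rw [List.foldl_cons, h, hc] <;> simp
    · exact List.mem_cons_of_mem _ (List.mem_cons_of_mem _ h)

-- characterisation of the linear argmax: it returns the pair at the first maximal spectrum value
theorem pv_lin_char (p : Int × Int) (ps : List (Int × Int)) :
    ps.foldl pvCombine p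
      = ((ps.map Prod.fst).foldl max p.1,
         ((p :: ps).getD (((p :: ps).map Prod.fst).idxOf ((ps.map Prod.fst).foldl max p.1)) (0, 0)).2) := by
  induction ps using List.reverseRecOn with
  | nil => simp [List.idxOf_cons_self]
  | append_singleton t q ih =>
    rw [List.foldl_append]
    simp only [List.foldl_cons, List.foldl_nil]
    rw [ih]
    have hmax : ((t ++ [q]).map Prod.fst).foldl max p.1
        = max ((t.map Prod.fst).foldl max p.1) q.1 := by
      simp [List.foldl_append]
    have hcons : (p :: (t ++ [q])) = (p :: t) ++ [q] := by simp
    simp only [pvCombine]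
    by_cases hq : q.1 > ((t.map Prod.fst).foldl max p.1)
    · rw [if_pos hq, hmax, max_eq_right (le_of_lt hq), hcons]
      have hnot : q.1 ∉ (p :: t).map Prod.fst := by
        simp only [List.map_cons]
        intro hmem
        rcases List.mem_cons.mp hmem with h | h
        · exact absurd ((pv_mem_le_foldl_max (t.map Prod.fst) p.1).1) (by omega)
        · exact absurd ((pv_mem_le_foldl_max (t.map Prod.fst) p.1).2 _ h) (by omega)
      have hidx : (((p :: t) ++ [q]).map Prod.fst).idxOf q.1 = (p :: t).length := by
        rw [List.map_append, List.idxOf_append_of_notMem hnot]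
        simp
      rw [hidx]
      have hget : ((p :: t) ++ [q]).getD (p :: t).length (0, 0) = q := by simp
      rw [hget]
    · rw [if_neg hq, hmax, max_eq_left (by omega), hcons]
      have hmem : (t.map Prod.fst).foldl max p.1 ∈ (p :: t).map Prod.fst := by
        simp only [List.map_cons]
        exact pv_foldl_max_mem _ _
      have hidx : (((p :: t) ++ [q]).map Prod.fst).idxOf ((t.map Prod.fst).foldl max p.1)
          = ((p :: t).map Prod.fst).idxOf ((t.map Prod.fst).foldl max p.1) := by
        rw [List.map_append, List.idxOf_append_of_mem hmem]
      have hlt : ((p :: t).map Prod.fst).idxOf ((t.map Prod.fst).foldl max p.1) < (p :: t).length := by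
        have := List.idxOf_lt_length_of_mem hmem
        simpa using this
      rw [hidx, List.getD_append]
      exact hlt

theorem pv_map_fst_zip (a b : List Int) : (a.zip b).map Prod.fst = a.take b.length := by
  induction a generalizing b with
  | nil => simp
  | cons x t ih =>
    rcases b with _ | ⟨y, s⟩
    · simp
    · simp [ih]

theorem pv_zip_getD (a b : List Int) (k : Nat) (ha : k < a.length) (hb : k < b.length) :
    (a.zip b).getD k (0, 0) = (a.getD k 0, b.getD k 0) := by
  induction a generalizing b k with
  | nil => simp at ha
  | cons x t ih =>
    rcases b with _ | ⟨y, s⟩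
    · simp at hb
    · rcases k with _ | k
      · rfl
      · simpa using ih s k (by simpa using ha) (by simpa using hb)

-- A-side loop characterisation (unconditional, with getD semantics for out-of-range freq)
theorem pvStep_congr (spec spec' freq : List Int) (n : Nat)
    (h : ∀ j < n, spec.getD j 0 = spec'.getD j 0) :
    ∀ st, (List.range n).foldl (pvStep spec freq) st
        = (List.range n).foldl (pvStep spec' freq) st := by
  induction n with
  | zero => intro st; rfl
  | succ k ih =>
    intro st
    rw [List.range_succ, List.foldl_append, List.foldl_append]
    rw [ih (fun j hj => h j (Nat.lt_succ_of_lt hj))]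
    simp only [List.foldl_cons, List.foldl_nil, pvStep, h k (Nat.lt_succ_self k)]

theorem pv_loop_char (x : Int) (t freq : List Int) :
    (List.range (x :: t).length).foldl (pvStep (x :: t) freq) (x, freq.getD 0 0)
      = (t.foldl max x, freq.getD ((x :: t).idxOf (t.foldl max x)) 0) := by
  induction t using List.reverseRecOn with
  | nil =>
    simp [pvStep, List.range_succ]
  | append_singleton t v ih =>
    have hlen : (x :: (t ++ [v])).length = (x :: t).length + 1 := by simp
    rw [hlen, List.range_succ, List.foldl_append]
    have hcongr : (List.range (x :: t).length).foldl (pvStep (x :: (t ++ [v])) freq) (x, freq.getD 0 0)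
        = (List.range (x :: t).length).foldl (pvStep (x :: t) freq) (x, freq.getD 0 0) := by
      apply pvStep_congr
      intro j hj
      simp only [List.length_cons] at hj
      rcases j with _ | j
      · rfl
      · simp only [List.getD_cons_succ]
        rw [List.getD_append]
        omega
    rw [hcongr, ih]
    simp only [List.foldl_cons, List.foldl_nil, pvStep]
    have hget : (x :: (t ++ [v])).getD (x :: t).length 0 = v := by
      simp
    rw [List.foldl_append]
    simp only [List.foldl_cons, List.foldl_nil]
    by_cases hv : v > t.foldl max x
    · rw [if_pos (by simpa [hget] using hv)]
      have hmax : max (t.foldl max x) v = v := max_eq_right (le_of_lt hv)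
      have hnot : v ∉ x :: t := by
        intro hmem
        rcases List.mem_cons.mp hmem with rfl | h
        · exact absurd ((pv_mem_le_foldl_max t v).1) (by omega)
        · exact absurd ((pv_mem_le_foldl_max t x).2 _ h) (by omega)
      have hidx : (x :: (t ++ [v])).idxOf v = (x :: t).length := by
        have : (x :: (t ++ [v])) = (x :: t) ++ [v] := by simp
        rw [this, List.idxOf_append_of_notMem hnot]
        simp [List.idxOf_cons_self]
      rw [hget, hmax, hidx]
    · rw [if_neg (by simpa [hget] using hv)]
      have hmax : max (t.foldl max x) v = t.foldl max x := max_eq_left (by omega)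
      have hmem : t.foldl max x ∈ x :: t := pv_foldl_max_mem t x
      have hidx : (x :: (t ++ [v])).idxOf (t.foldl max x) = (x :: t).idxOf (t.foldl max x) := by
        have : (x :: (t ++ [v])) = (x :: t) ++ [v] := by simp
        rw [this, List.idxOf_append_of_mem hmem]
      rw [hmax, hidx]

theorem getMaxFreq_spec : Claim_equal_getMaxFreq := by
  unfold Claim_equal_getMaxFreq
  intro spec freq _ hpre
  unfold Spec_getMaxFreq getMaxFreq getMaxFreq_alt
  rcases spec with _ | ⟨x, t⟩
  · simp
  rcases freq with _ | ⟨f, fr⟩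
  · simp
  rw [if_neg (by simp), if_neg (by simp)]
  have hkf : (x :: t).idxOf (t.foldl max x) < (f :: fr).length := by
    rcases hpre with h | h | h
    · exact absurd h (by simp)
    · exact absurd h (by simp)
    · rw [PySem.List.max?_id_cons] at h
      simpa using h
  have hMmem : t.foldl max x ∈ x :: t := pv_foldl_max_mem t x
  have hks : (x :: t).idxOf (t.foldl max x) < (x :: t).length := List.idxOf_lt_length_of_mem hMmem
  -- A's side
  have hA : ((List.range (x :: t).length).foldl (pvStep (x :: t) (f :: fr))
        ((x :: t).getD 0 0, (f :: fr).getD 0 0)).2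
      = (f :: fr).getD ((x :: t).idxOf (t.foldl max x)) 0 := by
    have h := pv_loop_char x t (f :: fr)
    simp only [List.getD_cons_zero] at h ⊢
    rw [h]
  -- B's side
  have hle : ∀ y ∈ x :: t, y ≤ t.foldl max x := by
    intro y hy
    rcases List.mem_cons.mp hy with rfl | h
    · exact (pv_mem_le_foldl_max t y).1
    · exact (pv_mem_le_foldl_max t x).2 y h
  have hMtake : t.foldl max x ∈ (x :: t).take (f :: fr).length := by
    have hkt : (x :: t).idxOf (t.foldl max x) < ((x :: t).take (f :: fr).length).length := by
      rw [List.length_take]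
      omega
    have h1 : ((x :: t).take (f :: fr).length)[(x :: t).idxOf (t.foldl max x)]'hkt
        = (x :: t)[(x :: t).idxOf (t.foldl max x)]'hks := List.getElem_take
    have h2 : (x :: t)[(x :: t).idxOf (t.foldl max x)]'hks = t.foldl max x :=
      List.getElem_idxOf hks
    rw [← h2, ← h1]
    exact List.getElem_mem hkt
  have hPfst : ((x, f) :: t.zip fr).map Prod.fst = (x :: t).take (f :: fr).length :=
    pv_map_fst_zip (x :: t) (f :: fr)
  have hchain : x :: (t.zip fr).map Prod.fst = (x :: t).take (f :: fr).length := by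
    simpa using hPfst
  have hfold_eq : ((t.zip fr).map Prod.fst).foldl max x = t.foldl max x := by
    have hmem' : ((t.zip fr).map Prod.fst).foldl max x ∈ x :: (t.zip fr).map Prod.fst :=
      pv_foldl_max_mem _ _
    have hub : t.foldl max x ≤ ((t.zip fr).map Prod.fst).foldl max x := by
      have hall := pv_mem_le_foldl_max ((t.zip fr).map Prod.fst) x
      have hMP : t.foldl max x ∈ x :: (t.zip fr).map Prod.fst := by
        rw [hchain]; exact hMtake
      rcases List.mem_cons.mp hMP with h | h
      · exact h.le.trans hall.1
      · exact hall.2 _ h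
    have hlb : ((t.zip fr).map Prod.fst).foldl max x ≤ t.foldl max x := by
      apply hle
      rw [hchain] at hmem'
      exact List.take_subset _ _ hmem'
    omega
  have hidxP : (((x, f) :: t.zip fr).map Prod.fst).idxOf (t.foldl max x)
      = (x :: t).idxOf (t.foldl max x) := by
    rw [hPfst]
    conv_rhs => rw [← List.take_append_drop (f :: fr).length (x :: t)]
    rw [List.idxOf_append_of_mem hMtake]
  have hkp : (x :: t).idxOf (t.foldl max x) < ((x, f) :: t.zip fr).length := by
    have : ((x, f) :: t.zip fr).length = ((x :: t).zip (f :: fr)).length := rfl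
    rw [this, List.length_zip]
    omega
  have hpget : ((x, f) :: t.zip fr).getD ((x :: t).idxOf (t.foldl max x)) (0, 0)
      = ((x :: t).getD ((x :: t).idxOf (t.foldl max x)) 0,
         (f :: fr).getD ((x :: t).idxOf (t.foldl max x)) 0) :=
    pv_zip_getD (x :: t) (f :: fr) _ hks hkf
  have hB : (pvBest ((x :: t).zip (f :: fr)) ((x :: t).zip (f :: fr)).length 0
        ((x :: t).zip (f :: fr)).length).2
      = (f :: fr).getD ((x :: t).idxOf (t.foldl max x)) 0 := by
    have hpos : 0 < ((x :: t).zip (f :: fr)).length := by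
      rw [List.length_zip]; simp
    rw [pvBest_eq_pvLin _ _ 0 _ (by omega) hpos le_rfl]
    simp only [List.drop_zero, Nat.sub_zero, List.take_length]
    show (pvLin ((x, f) :: t.zip fr)).2 = _
    show ((t.zip fr).foldl pvCombine (x, f)).2 = _
    rw [pv_lin_char]
    show (((x, f) :: t.zip fr).getD
        ((((x, f) :: t.zip fr).map Prod.fst).idxOf (((t.zip fr).map Prod.fst).foldl max x)) (0, 0)).2 = _
    rw [hfold_eq, hidxP, hpget]
  show ((List.range (x :: t).length).foldl (pvStep (x :: t) (f :: fr))
        ((x :: t).getD 0 0, (f :: fr).getD 0 0)).2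
      = (pvBest ((x :: t).zip (f :: fr)) ((x :: t).zip (f :: fr)).length 0
          ((x :: t).zip (f :: fr)).length).2
  rw [hA, hB]
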